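-- pv_equiv track=rewrite | github.com/Linyxus/theorem-proving-data | cleanup_data.py | contain_verilog_module
-- ===== SOURCE A (Python) =====
-- def contain_verilog_module(content: str):
--     has_module_start = False
--     for line in content.split('\n'):
--         if line.startswith('module '):
--             has_module_start = True
--         if line.startswith('endmodule') and has_module_start:
--             return True
--     return False
-- ===== SOURCE B (Python) =====
-- def contain_verilog_module(content: str):
--     lines = content.split('\n')
--     mods = [i for i, l in enumerate(lines) if l.startswith('module ')]
--     ends = [i for i, l in enumerate(lines) if l.startswith('endmodule')]
--     return bool(mods) and bool(ends) and min(mods) <= max(ends)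
-- ===== Notes on version B (the rewrite author's own statement) =====
-- stated objective: alternative
-- what changed: Replaces A's single flag-carrying early-return loop by an order-statistic formulation: collect the index list of module-start lines and the index list of endmodule lines with two enumerate-filters, then answer by comparing the minimum of the first list against the maximum of the second.
import Mathlib
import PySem

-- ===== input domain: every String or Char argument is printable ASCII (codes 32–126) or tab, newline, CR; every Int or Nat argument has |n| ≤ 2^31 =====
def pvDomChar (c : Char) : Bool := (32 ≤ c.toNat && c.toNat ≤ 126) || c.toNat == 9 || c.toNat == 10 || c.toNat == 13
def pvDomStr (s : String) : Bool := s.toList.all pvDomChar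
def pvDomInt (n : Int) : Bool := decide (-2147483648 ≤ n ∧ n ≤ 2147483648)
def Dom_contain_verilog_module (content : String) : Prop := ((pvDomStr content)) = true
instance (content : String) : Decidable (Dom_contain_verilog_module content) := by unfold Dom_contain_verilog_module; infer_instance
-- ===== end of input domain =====

-- B replaces A's single flag-carrying loop by two independent index collections (indices of
-- 'module '-lines and of 'endmodule'-lines) compared through min/max (alternative, same cost).


-- ===== PORT A =====
-- the for-loop with its has_module_start flag and early return
def pvGoA : List (List Char) → Bool → Bool
  | [], _ => false
  | l :: rest, flag =>
    let flag' := if PySem.Chars.startswith l "module ".toList then true else flag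
    if PySem.Chars.startswith l "endmodule".toList && flag' then true else pvGoA rest flag'

def contain_verilog_module (content : String) : Bool :=
  pvGoA (PySem.Chars.splitOn content.toList ['\n']) false

-- ===== PORT B =====
def contain_verilog_module_alt (content : String) : Bool :=
  let lines := PySem.Chars.splitOn content.toList ['\n']
  let mods := ((PySem.List.enumerate lines 0).filter
      (fun p => PySem.Chars.startswith p.2 "module ".toList)).map (fun p => p.1)
  let ends := ((PySem.List.enumerate lines 0).filter
      (fun p => PySem.Chars.startswith p.2 "endmodule".toList)).map (fun p => p.1)
  match PySem.List.min? mods (fun x => x), PySem.List.max? ends (fun x => x) with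
  | some m, some e => decide (m ≤ e)
  | _, _ => false

-- ===== PRECONDITION & SPEC =====
def Spec_contain_verilog_module (content : String) (out : Bool) : Prop := out = contain_verilog_module_alt content
instance (content : String) (out : Bool) : Decidable (Spec_contain_verilog_module content out) := by unfold Spec_contain_verilog_module; infer_instance

-- ===== CLAIM (what is proved, stated in full; the proofs are below) =====
def Claim_equal_contain_verilog_module : Prop := ∀ (content : String), Dom_contain_verilog_module content → Spec_contain_verilog_module content (contain_verilog_module content)

-- ===== LEMMAS AND PROOFS =====

-- common characterisation: some 'module '-line at index i precedes (or is) an 'endmodule'-line at index j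
def pvBoth (ls : List (List Char)) : Prop :=
  ∃ (i j : Nat) (hi : i < ls.length) (hj : j < ls.length),
    i ≤ j ∧ PySem.Chars.startswith ls[i] "module ".toList = true ∧
            PySem.Chars.startswith ls[j] "endmodule".toList = true

theorem pvGoA_true (ls : List (List Char)) :
    pvGoA ls true = ls.any (fun l => PySem.Chars.startswith l "endmodule".toList) := by
  induction ls with
  | nil => rfl
  | cons l rest ih =>
    simp only [pvGoA, List.any_cons]
    by_cases h : PySem.Chars.startswith l "endmodule".toList = true <;> simp [ih]

theorem pvGoA_false_iff (ls : List (List Char)) : pvGoA ls false = true ↔ pvBoth ls := by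
  induction ls with
  | nil => simp [pvGoA, pvBoth]
  | cons l rest ih =>
    by_cases hm : PySem.Chars.startswith l "module ".toList = true
    · simp only [pvGoA, hm, if_true, Bool.and_true]
      constructor
      · intro h
        by_cases he : PySem.Chars.startswith l "endmodule".toList = true
        · exact ⟨0, 0, by simp, by simp, Nat.le_refl 0, by simpa using hm, by simpa using he⟩
        · simp only [he, Bool.false_eq_true, if_false] at h
          rw [pvGoA_true, List.any_eq_true] at h
          obtain ⟨x, hx, hq⟩ := h
          obtain ⟨k, hk, rfl⟩ := List.mem_iff_getElem.mp hx
          exact ⟨0, k + 1, by simp, by simpa using Nat.succ_lt_succ hk,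
                 Nat.zero_le _, by simpa using hm, by simpa using hq⟩
      · rintro ⟨i, j, hi, hj, hij, hPi, hQj⟩
        by_cases he : PySem.Chars.startswith l "endmodule".toList = true
        · rw [if_pos he]
        · simp only [he, Bool.false_eq_true, if_false]
          rw [pvGoA_true, List.any_eq_true]
          cases j with
          | zero => simp at hQj; exact absurd hQj he
          | succ j' =>
            exact ⟨rest[j']'(by simpa using hj), List.getElem_mem _, by simpa using hQj⟩
    · simp only [pvGoA, hm, Bool.false_eq_true, if_false, Bool.and_false]
      rw [ih]
      constructor
      · rintro ⟨i, j, hi, hj, hij, hPi, hQj⟩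
        refine ⟨i + 1, j + 1, Nat.succ_lt_succ hi, Nat.succ_lt_succ hj,
          Nat.succ_le_succ hij, by simpa using hPi, by simpa using hQj⟩
      · rintro ⟨i, j, hi, hj, hij, hPi, hQj⟩
        cases i with
        | zero => simp at hPi; exact absurd hPi hm
        | succ i' =>
          cases j with
          | zero => omega
          | succ j' =>
            exact ⟨i', j', by simpa using hi, by simpa using hj, by omega,
                   by simpa using hPi, by simpa using hQj⟩

theorem pvAlt_iff (ls : List (List Char)) :
    (match PySem.List.min? (((PySem.List.enumerate ls 0).filter
        (fun p => PySem.Chars.startswith p.2 "module ".toList)).map (fun p => p.1)) (fun x => x),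
      PySem.List.max? (((PySem.List.enumerate ls 0).filter
        (fun p => PySem.Chars.startswith p.2 "endmodule".toList)).map (fun p => p.1)) (fun x => x) with
     | some m, some e => decide (m ≤ e)
     | _, _ => false) = true ↔ pvBoth ls := by
  have hmem : ∀ (pat : List Char) (x : Int),
      x ∈ ((PySem.List.enumerate ls 0).filter (fun p => PySem.Chars.startswith p.2 pat)).map
        (fun p => p.1) ↔
      ∃ (k : Nat) (hk : k < ls.length), x = (k : Int) ∧ PySem.Chars.startswith ls[k] pat = true := by
    intro pat x
    simp only [List.mem_map, List.mem_filter]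
    constructor
    · rintro ⟨p, ⟨hpmem, hp⟩, rfl⟩
      obtain ⟨k, hk, rfl⟩ := (PySem.List.mem_enumerate_iff _ _ _).mp hpmem
      exact ⟨k, hk, by simp, hp⟩
    · rintro ⟨k, hk, rfl, hp⟩
      exact ⟨((k : Int), ls[k]), ⟨(PySem.List.mem_enumerate_iff _ _ _).mpr ⟨k, hk, by simp⟩, hp⟩, rfl⟩
  constructor
  · intro h
    split at h
    · next m e hmin hmax =>
      have hle : m ≤ e := by simpa using h
      obtain ⟨i, hi, rfl, hPi⟩ := (hmem _ m).mp (PySem.List.min?_mem hmin)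
      obtain ⟨j, hj, rfl, hQj⟩ := (hmem _ e).mp (PySem.List.max?_mem hmax)
      exact ⟨i, j, hi, hj, by exact_mod_cast hle, hPi, hQj⟩
    · simp at h
  · rintro ⟨i, j, hi, hj, hij, hPi, hQj⟩
    have hiMem := (hmem "module ".toList (i : Int)).mpr ⟨i, hi, rfl, hPi⟩
    have hjMem := (hmem "endmodule".toList (j : Int)).mpr ⟨j, hj, rfl, hQj⟩
    cases hmin : PySem.List.min? (((PySem.List.enumerate ls 0).filter
        (fun p => PySem.Chars.startswith p.2 "module ".toList)).map (fun p => p.1)) (fun x => x) with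
    | none =>
      rw [PySem.List.min?_eq_none_iff] at hmin
      rw [hmin] at hiMem; simp at hiMem
    | some m =>
      cases hmax : PySem.List.max? (((PySem.List.enumerate ls 0).filter
          (fun p => PySem.Chars.startswith p.2 "endmodule".toList)).map (fun p => p.1)) (fun x => x) with
      | none =>
        rw [PySem.List.max?_eq_none_iff] at hmax
        rw [hmax] at hjMem; simp at hjMem
      | some e =>
        have h1 : m ≤ (i : Int) := PySem.List.min?_isMin hmin _ hiMem
        have h2 : (j : Int) ≤ e := PySem.List.max?_isMax hmax _ hjMem
        have hij' : (i : Int) ≤ (j : Int) := by exact_mod_cast hij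
        simp only [decide_eq_true_eq]
        omega

-- ===== VERDICT (by name: the statement is the Claim_ definition above) =====
theorem contain_verilog_module_spec : Claim_equal_contain_verilog_module := by
  intro content _
  unfold Spec_contain_verilog_module contain_verilog_module contain_verilog_module_alt
  apply Bool.coe_iff_coe.mp
  rw [pvGoA_false_iff, pvAlt_iff]
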